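-- pv_equiv track=rewrite | github.com/tpepels/mcts_python | scripts/genetic_optimization.py | crossover_dict
-- ===== SOURCE A (Python) =====
-- from typing import Any, Dict, List, Optional, Tuple, Union
--
-- def crossover_dict(parent1: dict, parent2: dict, crossover_point: int) -> Tuple[dict, dict]:
--     """
--     Helper function for the crossover operation, for a single dictionary of parameters.
--
--     This function takes two parent dictionaries and a crossover point, and returns
--     two child dictionaries that inherit some keys from each parent.
--
--     Args:
--         parent1 (dict): The first parent dictionary.
--         parent2 (dict): The second parent dictionary.
--         crossover_point (int): The index at which to crossover the two parents.
--
--     Returns: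
--         tuple: A pair of child dictionaries.
--
--     Example:
--         >>> parent1 = {'a': 1, 'b': 2, 'c': 3}
--         >>> parent2 = {'a': 4, 'b': 5, 'c': 6}
--         >>> crossover_dict(parent1, parent2, 2)
--         ({'a': 1, 'b': 2, 'c': 6}, {'a': 4, 'b': 5, 'c': 3})
--     """
--     child1 = {}
--     child2 = {}
--
--     for i, key in enumerate(parent1):
--         if i < crossover_point:
--             child1[key] = parent1[key]
--             child2[key] = parent2[key]
--         else:
--             child1[key] = parent2[key]
--             child2[key] = parent1[key]
--
--     return child1, child2
-- ===== SOURCE B (Python) =====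
-- def crossover_dict(parent1: dict, parent2: dict, crossover_point: int):
--     # Copy-then-swap: clone both parents wholesale (in parent1's key order),
--     # then exchange the two children's values over the tail of the key list.
--     keys = list(parent1)
--     child1 = dict(parent1)
--     child2 = {k: parent2[k] for k in keys}
--     for key in keys[max(0, crossover_point):]:
--         child1[key], child2[key] = child2[key], child1[key]
--     return child1, child2
-- ===== Notes on version B (the rewrite author's own statement) =====
-- stated objective: alternative
-- what changed: Replaces A's single pass that chooses a source parent per key by comparing the index against the crossover point with a copy-then-swap scheme: both children start as full clones of the respective parents (in parent1's key order) and a second pass swaps the values between the two children over the tail keys only, with no per-key index comparison and no merging of partial dicts.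
import Mathlib
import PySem

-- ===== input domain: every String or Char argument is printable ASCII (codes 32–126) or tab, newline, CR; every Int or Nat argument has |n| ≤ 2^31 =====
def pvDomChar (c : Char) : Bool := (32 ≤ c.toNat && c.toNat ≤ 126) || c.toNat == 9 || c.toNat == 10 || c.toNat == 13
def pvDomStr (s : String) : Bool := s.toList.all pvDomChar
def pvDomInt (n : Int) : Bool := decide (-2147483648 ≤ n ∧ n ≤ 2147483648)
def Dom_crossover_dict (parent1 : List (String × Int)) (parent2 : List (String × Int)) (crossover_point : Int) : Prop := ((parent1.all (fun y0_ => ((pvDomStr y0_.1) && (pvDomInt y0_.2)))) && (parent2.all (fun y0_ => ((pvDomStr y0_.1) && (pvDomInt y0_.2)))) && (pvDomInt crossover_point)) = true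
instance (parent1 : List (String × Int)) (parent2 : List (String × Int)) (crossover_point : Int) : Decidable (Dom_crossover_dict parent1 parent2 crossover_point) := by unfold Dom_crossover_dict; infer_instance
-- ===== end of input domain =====

-- B replaces A's per-key index-branching loop by a copy-then-swap scheme: both children
-- start as full clones of the parents and a second pass swaps their values over the tail
-- keys (objective: alternative).

-- ===== PORT A =====
-- the 'for i, key in enumerate(parent1)' loop: index i, remaining keys, accumulator (child1, child2)
def crossoverLoopA (d1 d2 : PySem.Dict String Int) (cp : Int) :
    Nat → List String → PySem.Dict String Int × PySem.Dict String Int →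
    PySem.Dict String Int × PySem.Dict String Int
  | _, [], acc => acc
  | i, k :: ks, (c1, c2) =>
      if (i : Int) < cp then
        crossoverLoopA d1 d2 cp (i + 1) ks
          (c1.insert k (d1.getD k 0), c2.insert k (d2.getD k 0))
      else
        crossoverLoopA d1 d2 cp (i + 1) ks
          (c1.insert k (d2.getD k 0), c2.insert k (d1.getD k 0))

def crossover_dict (parent1 : List (String × Int)) (parent2 : List (String × Int)) (crossover_point : Int) : (List (String × Int)) × (List (String × Int)) :=
  let d1 := PySem.Dict.ofList parent1
  let d2 := PySem.Dict.ofList parent2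
  let r := crossoverLoopA d1 d2 crossover_point 0 d1.keys (PySem.Dict.empty, PySem.Dict.empty)
  (r.1.items, r.2.items)

-- ===== PORT B =====
-- the swap loop 'for key in keys[...]: child1[key], child2[key] = child2[key], child1[key]'
def swapLoopB : List String → PySem.Dict String Int × PySem.Dict String Int →
    PySem.Dict String Int × PySem.Dict String Int
  | [], cs => cs
  | key :: ks, (c1, c2) =>
      let v1 := c2.getD key 0      -- RHS tuple evaluated first
      let v2 := c1.getD key 0
      swapLoopB ks (c1.insert key v1, c2.insert key v2)

def crossover_dict_alt (parent1 : List (String × Int)) (parent2 : List (String × Int)) (crossover_point : Int) : (List (String × Int)) × (List (String × Int)) :=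
  let d1 := PySem.Dict.ofList parent1
  let d2 := PySem.Dict.ofList parent2
  let keys := d1.keys
  let child1 := d1                                          -- dict(parent1)
  let child2 := keys.foldl (fun d k => d.insert k (d2.getD k 0)) PySem.Dict.empty
  let r := swapLoopB (PySem.List.slice keys (some (max 0 crossover_point)) none) (child1, child2)
  (r.1.items, r.2.items)

-- ===== PRECONDITION & SPEC =====
-- Pre_ excludes exactly the inputs where Python A raises KeyError: a key of parent1 missing from parent2.
def Pre_crossover_dict (parent1 : List (String × Int)) (parent2 : List (String × Int)) (crossover_point : Int) : Prop :=
  ∀ k ∈ parent1.map Prod.fst, k ∈ parent2.map Prod.fst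
instance (parent1 : List (String × Int)) (parent2 : List (String × Int)) (crossover_point : Int) : Decidable (Pre_crossover_dict parent1 parent2 crossover_point) := by unfold Pre_crossover_dict; infer_instance
def pvWitness_crossover_dict : (List (String × Int)) × (List (String × Int)) × Int :=
  ([("a", 1), ("b", 2)], [("a", 4), ("b", 5)], 1)

def Spec_crossover_dict (parent1 : List (String × Int)) (parent2 : List (String × Int)) (crossover_point : Int) (out : (List (String × Int)) × (List (String × Int))) : Prop := out = crossover_dict_alt parent1 parent2 crossover_point
instance (parent1 : List (String × Int)) (parent2 : List (String × Int)) (crossover_point : Int) (out : (List (String × Int)) × (List (String × Int))) : Decidable (Spec_crossover_dict parent1 parent2 crossover_point out) := by unfold Spec_crossover_dict; infer_instance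

-- ===== CLAIM (what is proved, stated in full; the proofs are below) =====
def Claim_equal_crossover_dict : Prop := ∀ (parent1 : List (String × Int)) (parent2 : List (String × Int)) (crossover_point : Int), Dom_crossover_dict parent1 parent2 crossover_point → Pre_crossover_dict parent1 parent2 crossover_point → Spec_crossover_dict parent1 parent2 crossover_point (crossover_dict parent1 parent2 crossover_point)

-- ===== LEMMAS AND PROOFS =====

-- A's loop, started at index i, is the head/tail split of the remaining keys at (max 0 cp).toNat - i.
lemma crossoverLoopA_split (d1 d2 : PySem.Dict String Int) (cp : Int) :
    ∀ (ks : List String) (i : Nat) (c1 c2 : PySem.Dict String Int),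
      crossoverLoopA d1 d2 cp i ks (c1, c2) =
        ((ks.drop ((max 0 cp).toNat - i)).foldl (fun d k => d.insert k (d2.getD k 0))
           ((ks.take ((max 0 cp).toNat - i)).foldl (fun d k => d.insert k (d1.getD k 0)) c1),
         (ks.drop ((max 0 cp).toNat - i)).foldl (fun d k => d.insert k (d1.getD k 0))
           ((ks.take ((max 0 cp).toNat - i)).foldl (fun d k => d.insert k (d2.getD k 0)) c2)) := by
  intro ks
  induction ks with
  | nil => intro i c1 c2; simp [crossoverLoopA]
  | cons k ks ih =>
      intro i c1 c2
      by_cases h : (i : Int) < cp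
      · have hlt : i < (max 0 cp).toNat := by omega
        have hs : (max 0 cp).toNat - i = ((max 0 cp).toNat - (i + 1)) + 1 := by omega
        rw [crossoverLoopA, if_pos h, ih (i + 1), hs]
        simp [List.take_succ_cons, List.drop_succ_cons]
      · have hz : (max 0 cp).toNat - i = 0 := by omega
        have hz' : (max 0 cp).toNat - (i + 1) = 0 := by omega
        rw [crossoverLoopA, if_neg h, ih (i + 1), hz, hz']
        simp

-- B's swap loop over distinct keys is a pair of independent insert folds reading the ORIGINAL dicts.
lemma swapLoopB_split :
    ∀ (ks : List String) (X Y : PySem.Dict String Int), ks.Nodup →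
      swapLoopB ks (X, Y) =
        (ks.foldl (fun d k => d.insert k (Y.getD k 0)) X,
         ks.foldl (fun d k => d.insert k (X.getD k 0)) Y) := by
  intro ks
  induction ks with
  | nil => intro X Y _; simp [swapLoopB]
  | cons k ks ih =>
      intro X Y hnd
      rw [List.nodup_cons] at hnd
      rw [swapLoopB]
      rw [ih _ _ hnd.2]
      simp only [List.foldl_cons]
      congr 1
      · exact PySem.List.foldl_congr_mem' _ _ _ _ (fun k' hk' acc => by
          have hne : k' ≠ k := fun he => hnd.1 (he ▸ hk')
          rw [PySem.Dict.getD_insert_of_ne _ _ _ hne])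
      · exact PySem.List.foldl_congr_mem' _ _ _ _ (fun k' hk' acc => by
          have hne : k' ≠ k := fun he => hnd.1 (he ▸ hk')
          rw [PySem.Dict.getD_insert_of_ne _ _ _ hne])

-- Overwriting a fold over the tail keys of a dict replaces those entries in place.
lemma overwrite_fold (f g : String → Int) :
    ∀ (ks : List String) (pre : List (String × Int)) (d : PySem.Dict String Int),
      ks.Nodup → (∀ k ∈ ks, k ∉ pre.map Prod.fst) →
      d.items = pre ++ ks.map (fun k => (k, g k)) →
      (ks.foldl (fun d k => d.insert k (f k)) d).items = pre ++ ks.map (fun k => (k, f k)) := by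
  intro ks
  induction ks with
  | nil => intro pre d _ _ hitems; simpa using hitems
  | cons k ks ih =>
      intro pre d hnd hfresh hitems
      rw [List.nodup_cons] at hnd
      have hcont : d.contains k = true := by
        apply (PySem.Dict.contains_iff_mem_keys _ _).mpr
        simp only [PySem.Dict.keys, hitems]
        simp
      have hins : (d.insert k (f k)).items =
          (pre ++ [(k, f k)]) ++ ks.map (fun k' => (k', g k')) := by
        rw [PySem.Dict.items_insert_of_contains _ _ hcont, hitems]
        simp only [List.map_append, List.map_cons, List.append_assoc]
        congr 1
        · rw [List.map_congr_left (g := id)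
            (fun p hp => by
              have hne : p.1 ≠ k := fun he => hfresh k (by simp) (he ▸ List.mem_map_of_mem hp)
              simp [hne]), List.map_id]
        · simp only [List.cons_append, List.nil_append]
          congr 1
          · simp
          · rw [List.map_map]
            apply List.map_congr_left
            intro k' hk'
            have hne : k' ≠ k := fun he => hnd.1 (he ▸ hk')
            simp [Function.comp, hne]
      rw [List.foldl_cons]
      rw [ih (pre ++ [(k, f k)]) _ hnd.2
        (fun k' hk' => by
          simp only [List.map_append, List.mem_append]
          rintro (h | h)
          · exact hfresh k' (by simp [hk']) h
          · simp only [List.map_cons, List.map_nil, List.mem_singleton] at h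
            exact hnd.1 (h ▸ hk'))
        hins]
      simp

-- a fold of inserts with FRESH distinct keys appends, as items (wrapper of items_foldl_insert_fresh with the identity key)
lemma items_fold_fresh (f : String → Int) (l : List String) (d : PySem.Dict String Int)
    (hfresh : ∀ a ∈ l, d.contains a = false) (hnd : l.Nodup) :
    (l.foldl (fun d k => d.insert k (f k)) d).items = d.items ++ l.map (fun k => (k, f k)) := by
  simpa using PySem.Dict.items_foldl_insert_fresh l (fun x => x) f d
    (by simpa using hfresh) (by simpa using hnd)

-- the core equality: A's head/tail split folds against B's clone-then-swap, as items
lemma childAB_eq (d1 d2 : PySem.Dict String Int) (cut : Nat) (hnd : d1.keys.Nodup) :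
    (((d1.keys.drop cut).foldl (fun d k => d.insert k (d2.getD k 0))
        ((d1.keys.take cut).foldl (fun d k => d.insert k (d1.getD k 0)) PySem.Dict.empty)).items,
     ((d1.keys.drop cut).foldl (fun d k => d.insert k (d1.getD k 0))
        ((d1.keys.take cut).foldl (fun d k => d.insert k (d2.getD k 0)) PySem.Dict.empty)).items)
    =
    (((swapLoopB (d1.keys.drop cut)
        (d1, d1.keys.foldl (fun d k => d.insert k (d2.getD k 0)) PySem.Dict.empty)).1).items,
     ((swapLoopB (d1.keys.drop cut)
        (d1, d1.keys.foldl (fun d k => d.insert k (d2.getD k 0)) PySem.Dict.empty)).2).items) := by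
  set keys := d1.keys with hkeys
  set f1 : String → Int := fun k => d1.getD k 0 with hf1
  set f2 : String → Int := fun k => d2.getD k 0 with hf2
  set head := keys.take cut with hhead
  set tail := keys.drop cut with htail
  have hsplit : keys = head ++ tail := (List.take_append_drop cut keys).symm
  have hndsplit := hsplit ▸ hnd
  rw [List.nodup_append] at hndsplit
  obtain ⟨hndh, hndt, hdisj⟩ := hndsplit
  have hdisj' : ∀ k ∈ tail, k ∉ head := fun k hk hk' => hdisj _ hk' _ hk rfl
  set child2 := keys.foldl (fun d k => d.insert k (d2.getD k 0)) PySem.Dict.empty with hchild2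
  have hch2items : child2.items = keys.map (fun k => (k, f2 k)) := by
    rw [hchild2, items_fold_fresh f2 keys PySem.Dict.empty
      (fun a _ => PySem.Dict.contains_empty a) hnd]
    rfl
  have hch2keys : child2.keys = keys := by
    simp only [PySem.Dict.keys, hch2items, List.map_map]
    simp [Function.comp_def]
  have hch2get : ∀ k ∈ tail, child2.getD k 0 = f2 k := by
    intro k hk
    have hkk : k ∈ keys := hsplit ▸ List.mem_append_right _ hk
    exact PySem.Dict.getD_of_mem_items child2
      (by rw [hch2items]; exact List.mem_map_of_mem hkk)
      (by rw [hch2keys]; exact hnd) 0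
  -- B's swap loop
  rw [swapLoopB_split tail d1 child2 hndt]
  simp only []
  rw [PySem.List.foldl_congr_mem' tail _ (fun d k => d.insert k (f2 k)) d1
    (fun k hk acc => by rw [hch2get k hk])]
  -- items of d1 and child2 split at cut
  have hd1items : d1.items = head.map (fun k => (k, f1 k)) ++ tail.map (fun k => (k, f1 k)) := by
    rw [PySem.Dict.items_eq_map_keys d1 hnd 0, ← hkeys]
    conv_lhs => rw [hsplit]
    rw [List.map_append]
  have hch2items' : child2.items = head.map (fun k => (k, f2 k)) ++ tail.map (fun k => (k, f2 k)) := by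
    rw [hch2items]
    conv_lhs => rw [hsplit]
    rw [List.map_append]
  have hB1 : (tail.foldl (fun d k => d.insert k (f2 k)) d1).items =
      head.map (fun k => (k, f1 k)) ++ tail.map (fun k => (k, f2 k)) :=
    overwrite_fold f2 f1 tail _ d1 hndt
      (fun k hk => by simpa using hdisj' k hk) hd1items
  have hB2 : (tail.foldl (fun d k => d.insert k (d1.getD k 0)) child2).items =
      head.map (fun k => (k, f2 k)) ++ tail.map (fun k => (k, f1 k)) :=
    overwrite_fold f1 f2 tail _ child2 hndt
      (fun k hk => by simpa using hdisj' k hk) hch2items'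
  -- A's children: head fold appends fresh, then tail fold appends fresh
  have hA : ∀ gh gt : String → Int,
      (tail.foldl (fun d k => d.insert k (gt k))
        (head.foldl (fun d k => d.insert k (gh k)) PySem.Dict.empty)).items =
      head.map (fun k => (k, gh k)) ++ tail.map (fun k => (k, gt k)) := by
    intro gh gt
    have hh : (head.foldl (fun d k => d.insert k (gh k)) PySem.Dict.empty).items =
        head.map (fun k => (k, gh k)) := by
      rw [items_fold_fresh gh head PySem.Dict.empty (fun a _ => PySem.Dict.contains_empty a) hndh]
      rfl
    have hkeysh : (head.foldl (fun d k => d.insert k (gh k)) PySem.Dict.empty).keys = head := by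
      simp only [PySem.Dict.keys, hh, List.map_map]
      simp [Function.comp_def]
    rw [items_fold_fresh gt tail _
      (fun a ha => by
        rw [← Bool.not_eq_true] at *
        intro hcontr
        exact hdisj' a ha (by
          have := (PySem.Dict.contains_iff_mem_keys _ a).mp hcontr
          rwa [hkeysh] at this)) hndt, hh]
  refine Prod.ext ?_ ?_
  · show (tail.foldl (fun d k => d.insert k (f2 k))
        (head.foldl (fun d k => d.insert k (f1 k)) PySem.Dict.empty)).items =
      (tail.foldl (fun d k => d.insert k (f2 k)) d1).items
    rw [hA f1 f2, hB1]
  · show (tail.foldl (fun d k => d.insert k (f1 k))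
        (head.foldl (fun d k => d.insert k (f2 k)) PySem.Dict.empty)).items =
      (tail.foldl (fun d k => d.insert k (d1.getD k 0)) child2).items
    rw [hA f2 f1, hB2]

-- ===== VERDICT (by name: the statement is the Claim_ definition above) =====
theorem crossover_dict_spec : Claim_equal_crossover_dict := by
  intro parent1 parent2 cp _ _
  unfold Spec_crossover_dict
  simp only [crossover_dict, crossover_dict_alt]
  have hnn : (0 : Int) ≤ max 0 cp := le_max_left _ _
  have hc : max 0 cp = (((max 0 cp).toNat : Nat) : Int) := (Int.toNat_of_nonneg hnn).symm
  rw [crossoverLoopA_split]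
  rw [hc, PySem.List.slice_from_natCast]
  simp only [Nat.sub_zero]
  exact childAB_eq (PySem.Dict.ofList parent1) (PySem.Dict.ofList parent2)
    ((max 0 cp).toNat) (PySem.Dict.nodup_keys_ofList parent1)
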